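-- pv_equiv track=rewrite | github.com/qcambrel/codewars | 6kyu/sum_consecutives/sum_consecutives.py | sum_consecutives
-- ===== SOURCE A (Python) =====
-- def sum_consecutives(ints):
-- 	sums = []
-- 	for k in range(len(ints)):
-- 		if k == 0:
-- 			sums.append(ints[k])
-- 		elif ints[k] == ints[k - 1]:
-- 			sums[-1] = sums[-1] + ints[k]
-- 		else:
-- 			sums.append(ints[k])
-- 	return sums
-- ===== SOURCE B (Python) =====
-- from itertools import groupby
--
-- def sum_consecutives(ints):
--     return [sum(group) for _, group in groupby(ints)]
-- ===== Notes on version B (the rewrite author's own statement) =====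
-- stated objective: idiomatic
-- what changed: Replaces the index loop that mutates the last accumulator in place with itertools.groupby: split into maximal runs of equal values and map sum over the runs.
import Mathlib
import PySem

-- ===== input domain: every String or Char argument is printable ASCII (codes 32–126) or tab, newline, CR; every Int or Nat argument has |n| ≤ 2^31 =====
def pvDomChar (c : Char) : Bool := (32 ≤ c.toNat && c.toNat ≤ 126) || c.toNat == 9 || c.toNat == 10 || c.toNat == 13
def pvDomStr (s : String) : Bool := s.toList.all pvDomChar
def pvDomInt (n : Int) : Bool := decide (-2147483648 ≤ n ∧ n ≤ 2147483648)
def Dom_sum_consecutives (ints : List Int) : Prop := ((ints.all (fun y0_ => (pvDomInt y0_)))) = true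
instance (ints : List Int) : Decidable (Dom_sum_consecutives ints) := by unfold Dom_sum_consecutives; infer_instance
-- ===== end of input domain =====

-- B replaces A's index loop (which mutates the last accumulator in place) by an
-- itertools.groupby-style decomposition: split into maximal runs, map sum over the runs.

-- ===== PORT A =====
-- literal port of A's index loop: for k in range(len(ints)): append / update sums[-1]
def sum_consecutives (ints : List Int) : List Int :=
  (PySem.List.pyRange 0 (ints.length : Int) 1).foldl
    (fun sums k =>
      if k == 0 then
        sums ++ [PySem.List.pyGetD ints k 0]
      else if PySem.List.pyGetD ints k 0 == PySem.List.pyGetD ints (k - 1) 0 then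
        PySem.List.pySetD sums (-1) (PySem.List.pyGetD sums (-1) 0 + PySem.List.pyGetD ints k 0)
      else
        sums ++ [PySem.List.pyGetD ints k 0])
    []

-- ===== PORT B =====
-- itertools.groupby (no key): the list of maximal runs of equal adjacent elements
def pyGroupBy : List Int → List (List Int)
  | [] => []
  | x :: xs => (x :: xs.takeWhile (· == x)) :: pyGroupBy (xs.dropWhile (· == x))
  termination_by l => l.length
  decreasing_by
    simp only [List.length_cons]
    exact Nat.lt_succ_of_le (List.length_dropWhile_le _ _)

def sum_consecutives_alt (ints : List Int) : List Int :=
  (pyGroupBy ints).map List.sum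

-- ===== PRECONDITION & SPEC =====
def Spec_sum_consecutives (ints : List Int) (out : List Int) : Prop := out = sum_consecutives_alt ints
instance (ints : List Int) (out : List Int) : Decidable (Spec_sum_consecutives ints out) := by unfold Spec_sum_consecutives; infer_instance

-- ===== CLAIM (what is proved, stated in full; the proofs are below) =====
def Claim_equal_sum_consecutives : Prop := ∀ (ints : List Int), Dom_sum_consecutives ints → Spec_sum_consecutives ints (sum_consecutives ints)

-- ===== LEMMAS AND PROOFS =====
theorem alt_ne_nil (l : List Int) (h : l ≠ []) : sum_consecutives_alt l ≠ [] := by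
  cases l with
  | nil => exact absurd rfl h
  | cons x xs => simp [sum_consecutives_alt, pyGroupBy]

theorem set_last (xs : List Int) (v : Int) (h : xs ≠ []) :
    xs.set (xs.length - 1) v = xs.dropLast ++ [v] := by
  induction xs with
  | nil => exact absurd rfl h
  | cons x xs ih =>
    cases xs with
    | nil => simp
    | cons y ys =>
      simp only [List.length_cons, Nat.add_sub_cancel, List.set_cons_succ] at *
      rw [List.dropLast_cons_of_ne_nil (by simp), List.cons_append]
      congr 1
      simpa using ih (by simp)

theorem pySetD_neg_one (xs : List Int) (v : Int) (h : xs ≠ []) :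
    PySem.List.pySetD xs (-1) v = xs.dropLast ++ [v] := by
  have hlen : 1 ≤ xs.length := List.length_pos_iff.mpr h
  rw [show ((-1 : Int)) = -((1:Nat):Int) by norm_num]
  simp only [PySem.List.pySetD, PySem.List.pySet?, PySem.List.pyIdx?, Nat.cast_one, Int.reduceNeg,
    Int.neg_nonneg, Int.reduceLE, reduceIte, neg_le_neg_iff, Nat.one_le_cast, neg_neg,
    Int.toNat_one, Option.map_if]
  rw [if_pos hlen, Option.getD_some]
  exact set_last xs v h

theorem getLastD_default_irrel (l : List Int) (h : l ≠ []) (c1 c2 : Int) :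
    l.getLastD c1 = l.getLastD c2 := by
  cases l with
  | nil => exact absurd rfl h
  | cons x xs => rw [List.getLastD_cons, List.getLastD_cons]

theorem getLastD_append_right (l d : List Int) (h : d ≠ []) (c : Int) :
    (l ++ d).getLastD c = d.getLastD c := by
  rw [List.getLastD_eq_getLast?, List.getLastD_eq_getLast?,
    List.getLast?_append_of_ne_nil l h]

theorem getLastD_all_eq (l : List Int) (x : Int) (h : ∀ y ∈ l, y = x) :
    (x :: l).getLastD 0 = x := by
  induction l generalizing x with
  | nil => simp
  | cons y ys ih =>
    rw [List.getLastD_cons, show y = x from h y (by simp), List.getLastD_cons]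
    exact (List.getLastD_cons ▸ ih x (fun z hz => h z (by simp [hz])))

-- B on a snoc: the appended element either extends the last run or opens a new one
theorem alt_snoc (xs : List Int) (h : xs ≠ []) : ∀ (a : Int),
    sum_consecutives_alt (xs ++ [a]) =
      if xs.getLastD 0 = a then
        (sum_consecutives_alt xs).dropLast ++ [(sum_consecutives_alt xs).getLastD 0 + a]
      else sum_consecutives_alt xs ++ [a] := by
  induction xs using pyGroupBy.induct with
  | case1 => exact absurd rfl h
  | case2 x t ih =>
    intro a
    by_cases hd : t.dropWhile (· == x) = []
    · -- every element of t equals x: one single run so far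
      have hall : ∀ y ∈ t, y = x := by
        intro y hy
        simpa using List.dropWhile_eq_nil_iff.mp hd y hy
      have htw : t.takeWhile (· == x) = t :=
        List.takeWhile_eq_self_iff.mpr (by intro y hy; simpa using hall y hy)
      have hlast : (x :: t).getLastD 0 = x := getLastD_all_eq t x hall
      by_cases hax : a = x
      · have htwa : (t ++ [a]).takeWhile (· == x) = t ++ [a] :=
          List.takeWhile_eq_self_iff.mpr (by
            intro y hy
            rcases List.mem_append.mp hy with hy | hy
            · simp [hall y hy]
            · simp at hy; simp [hy, hax])
        have hdwa : (t ++ [a]).dropWhile (· == x) = [] :=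
          List.dropWhile_eq_nil_iff.mpr (by
            intro y hy
            rcases List.mem_append.mp hy with hy | hy
            · simp [hall y hy]
            · simp at hy; simp [hy, hax])
        have hL : sum_consecutives_alt ((x :: t) ++ [a]) = [(x :: (t ++ [a])).sum] := by
          simp [sum_consecutives_alt, pyGroupBy, htwa, hdwa]
        have hR : sum_consecutives_alt (x :: t) = [(x :: t).sum] := by
          simp [sum_consecutives_alt, pyGroupBy, htw, hd]
        rw [hL, if_pos (by rw [hlast, hax]), hR]
        simp
        ring
      · have hax' : ((a == x) = false) := by simp [hax]
        have htwa : (t ++ [a]).takeWhile (· == x) = t := by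
          rw [List.takeWhile_append, if_pos (by rw [htw])]
          simp [List.takeWhile, hax']
        have hdwa : (t ++ [a]).dropWhile (· == x) = [a] := by
          rw [List.dropWhile_append, if_pos (by rw [hd]; rfl)]
          simp [List.dropWhile, hax']
        have hL : sum_consecutives_alt ((x :: t) ++ [a]) = [(x :: t).sum, a] := by
          simp [sum_consecutives_alt, pyGroupBy, htwa, hdwa]
        have hR : sum_consecutives_alt (x :: t) = [(x :: t).sum] := by
          simp [sum_consecutives_alt, pyGroupBy, htw, hd]
        rw [hL, if_neg (by intro hh; exact hax (hlast ▸ hh).symm ), hR]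
        rfl
    · -- the run stops inside t; recurse on the remainder d
      have hne : ¬ (t.takeWhile (· == x)).length = t.length := by
        intro hlen
        have := List.takeWhile_append_dropWhile (p := (· == x)) (l := t)
        have h2 : (t.takeWhile (· == x)).length + (t.dropWhile (· == x)).length = t.length := by
          rw [← List.length_append, this]
        have : (t.dropWhile (· == x)).length = 0 := by omega
        exact hd (List.length_eq_zero_iff.mp this)
      have htw : (t ++ [a]).takeWhile (· == x) = t.takeWhile (· == x) := by
        rw [List.takeWhile_append, if_neg hne]
      have hdw : (t ++ [a]).dropWhile (· == x) = t.dropWhile (· == x) ++ [a] := by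
        rw [List.dropWhile_append, if_neg (by simpa [List.isEmpty_iff] using hd)]
      have hlast : (x :: t).getLastD 0 = (t.dropWhile (· == x)).getLastD 0 := by
        rw [List.getLastD_cons]
        conv_lhs => rw [show t = t.takeWhile (· == x) ++ t.dropWhile (· == x) from
          (List.takeWhile_append_dropWhile).symm]
        rw [getLastD_append_right _ _ hd]
        exact getLastD_default_irrel _ hd _ _
      have haltne := alt_ne_nil _ hd
      have halt : sum_consecutives_alt (x :: t) =
          (x + (t.takeWhile (· == x)).sum) :: sum_consecutives_alt (t.dropWhile (· == x)) := by
        simp [sum_consecutives_alt, pyGroupBy]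
      have hstep : sum_consecutives_alt ((x :: t) ++ [a]) =
          (x + (t.takeWhile (· == x)).sum) ::
            sum_consecutives_alt (t.dropWhile (· == x) ++ [a]) := by
        simp only [List.cons_append, sum_consecutives_alt, pyGroupBy, htw, hdw]
        rfl
      rw [hstep, ih hd a, halt, hlast]
      by_cases hc : (t.dropWhile (· == x)).getLastD 0 = a
      · rw [if_pos hc, if_pos hc,
          List.dropLast_cons_of_ne_nil haltne, List.getLastD_cons]
        simp
        rw [← List.getLastD_eq_getLast?, ← List.getLastD_eq_getLast?]
        exact getLastD_default_irrel _ haltne _ _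
      · rw [if_neg hc, if_neg hc]
        simp

-- loop invariant: after the first n iterations of A, sums = B on the first n elements
theorem loop_inv (ints : List Int) (n : Nat) (hn : n ≤ ints.length) :
    (PySem.List.pyRange 0 (n : Int) 1).foldl
      (fun sums k =>
        if k == 0 then
          sums ++ [PySem.List.pyGetD ints k 0]
        else if PySem.List.pyGetD ints k 0 == PySem.List.pyGetD ints (k - 1) 0 then
          PySem.List.pySetD sums (-1) (PySem.List.pyGetD sums (-1) 0 + PySem.List.pyGetD ints k 0)
        else
          sums ++ [PySem.List.pyGetD ints k 0])
      [] = sum_consecutives_alt (ints.take n) := by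
  induction n with
  | zero => simp [sum_consecutives_alt, pyGroupBy]
  | succ n ih =>
    have hn' : n ≤ ints.length := Nat.le_of_succ_le hn
    have hlt : n < ints.length := hn
    rw [show ((n + 1 : Nat) : Int) = (n : Int) + 1 by push_cast; ring,
      PySem.List.pyRange_one_succ_right (by positivity), List.foldl_append, ih hn']
    simp only [List.foldl_cons, List.foldl_nil]
    have hget : PySem.List.pyGetD ints (n : Int) 0 = ints[n] := by
      rw [PySem.List.pyGetD_natCast, List.getD_eq_getElem _ _ hlt]
    have htake : ints.take (n + 1) = ints.take n ++ [ints[n]] := by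
      rw [List.take_add_one, List.getElem?_eq_getElem hlt]; rfl
    by_cases h0 : n = 0
    · subst h0
      cases ints with
      | nil => simp at hlt
      | cons i r =>
        simp [sum_consecutives_alt, pyGroupBy, PySem.List.pyGetD_zero]
    · have h0' : ((n : Int) == 0) = false := by simp [h0]
      rw [h0', if_neg (by simp)]
      have hprev : PySem.List.pyGetD ints ((n : Int) - 1) 0 = ints[n - 1] := by
        rw [show ((n : Int) - 1) = ((n - 1 : Nat) : Int) by omega, PySem.List.pyGetD_natCast,
          List.getD_eq_getElem _ _ (by omega)]
      have htne : ints.take n ≠ [] := by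
        intro hh
        have := congrArg List.length hh
        simp [Nat.min_eq_left hn'] at this
        omega
      have hlastTake : (ints.take n).getLastD 0 = ints[n - 1] := by
        rw [List.getLastD_eq_getLast?, List.getLast?_eq_getElem?]
        have hlen : (ints.take n).length = n := by simp [Nat.min_eq_left hn']
        rw [hlen, List.getElem?_take, if_pos (by omega),
          List.getElem?_eq_getElem (by omega : n - 1 < ints.length)]
        rfl
      rw [hget, hprev, htake, alt_snoc _ htne, hlastTake]
      by_cases hc : ints[n] = ints[n - 1]
      · rw [if_pos (by simpa using hc), if_pos hc.symm,
          pySetD_neg_one _ _ (alt_ne_nil _ htne)]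
        congr 2
        rw [PySem.List.pyGetD_neg_one _ _ (alt_ne_nil _ htne), List.getLastD_eq_getLast?,
          List.getLast?_eq_getLast_of_ne_nil (alt_ne_nil _ htne)]
        rfl
      · rw [if_neg (by simpa using hc), if_neg (fun hh => hc hh.symm)]

-- ===== VERDICT (by name: the statement is the Claim_ definition above) =====
theorem sum_consecutives_spec : Claim_equal_sum_consecutives := by
  intro ints _
  unfold Spec_sum_consecutives sum_consecutives
  have h := loop_inv ints ints.length le_rfl
  simpa [List.take_length] using h
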